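-- pv_equiv track=rewrite | github.com/naloui1/test_18_10_2023 | jeux_mots.py | double_consonne
-- ===== SOURCE A (Python) =====
-- def double_consonne(mot):
--     test=False
--     p=None
--     i=0
--     while (i<=(len(mot)-2)):
--         if mot[i]not in 'aeiouy' and mot[i]==mot[i+1]:
--             test=True
--             p=mot[i]
--             break
--         else:
--             test=False
--             i=i+1
--     return test,p
-- ===== SOURCE B (Python) =====
-- def double_consonne(mot):
--     # Stage 1: run-length encode the word into (char, count) runs.
--     runs = []
--     for ch in mot:
--         if runs and runs[-1][0] == ch:
--             runs[-1][1] += 1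
--         else:
--             runs.append([ch, 1])
--     # Stage 2: the first doubled consonant is the first run of length >= 2
--     # whose character is not a vowel (a doubled pair can only occur inside a run).
--     for ch, n in runs:
--         if n >= 2 and ch not in 'aeiouy':
--             return True, ch
--     return False, None
-- ===== Notes on version B (the rewrite author's own statement) =====
-- stated objective: alternative
-- what changed: B first run-length encodes the word into (char,count) runs, then scans the runs for the first run of length >= 2 with a non-vowel character, instead of A's index-based while loop comparing adjacent positions.
import Mathlib
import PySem

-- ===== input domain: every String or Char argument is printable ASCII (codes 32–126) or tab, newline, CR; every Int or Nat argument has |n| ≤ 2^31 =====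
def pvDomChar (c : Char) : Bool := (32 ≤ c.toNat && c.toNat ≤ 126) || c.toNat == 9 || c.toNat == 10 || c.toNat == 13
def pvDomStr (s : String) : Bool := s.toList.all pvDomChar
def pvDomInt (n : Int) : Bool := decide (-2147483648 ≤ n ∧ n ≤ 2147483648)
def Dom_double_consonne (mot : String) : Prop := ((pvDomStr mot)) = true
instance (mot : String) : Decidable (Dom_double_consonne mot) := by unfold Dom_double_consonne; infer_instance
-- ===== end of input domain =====

-- B replaces A's adjacent-index while loop by a two-stage algorithm: run-length
-- encode the word into (char, count) runs, then scan the runs for the first run of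
-- length >= 2 with a non-vowel character (a doubled pair only occurs inside a run).
-- Same O(n) cost; the objective is an alternative algorithm, not speed.

-- ===== PORT A =====
def pvVoyelle (c : Char) : Bool := c = 'a' || c = 'e' || c = 'i' || c = 'o' || c = 'u' || c = 'y'

-- A's while loop: index i, condition i <= len(mot)-2 (i.e. i+2 <= len)
def pvALoop (cs : List Char) (i : Nat) : Bool × Option String :=
  if h : i + 2 ≤ cs.length then
    if ¬ pvVoyelle cs[i] && cs[i] = cs[i+1] then (true, some (String.ofList [cs[i]]))
    else pvALoop cs (i+1)
  else (false, none)
termination_by cs.length - i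

def double_consonne (mot : String) : Bool × Option String := pvALoop mot.toList 0

-- ===== PORT B =====
-- B stage 1, loop body: 'if runs and runs[-1][0] == ch: runs[-1][1] += 1 else: runs.append([ch,1])'
def pvAddCh (runs : List (Char × Nat)) (ch : Char) : List (Char × Nat) :=
  match runs.getLast? with
  | some (c, n) => if c = ch then runs.dropLast ++ [(c, n + 1)] else runs ++ [(ch, 1)]
  | none => [(ch, 1)]

-- B stage 2: first run of length >= 2 whose character is not a vowel
def pvScanRuns : List (Char × Nat) → Bool × Option String
  | [] => (false, none)
  | (c, n) :: rest =>
    if 2 ≤ n ∧ pvVoyelle c = false then (true, some (String.ofList [c])) else pvScanRuns rest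

def double_consonne_alt (mot : String) : Bool × Option String :=
  pvScanRuns (mot.toList.foldl pvAddCh [])

-- ===== PRECONDITION & SPEC =====
def Spec_double_consonne (mot : String) (out : Bool × Option String) : Prop := out = double_consonne_alt mot
instance (mot : String) (out : Bool × Option String) : Decidable (Spec_double_consonne mot out) := by unfold Spec_double_consonne; infer_instance

-- ===== CLAIM (what is proved, stated in full; the proofs are below) =====
def Claim_equal_double_consonne : Prop := ∀ (mot : String), Dom_double_consonne mot → Spec_double_consonne mot (double_consonne mot)

-- ===== LEMMAS AND PROOFS =====

-- proof helper: prepend a run (c, n) to a run list, fusing with an equal-char head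
def pvAbsorb (c : Char) (n : Nat) : List (Char × Nat) → List (Char × Nat)
  | [] => [(c, n)]
  | (d, m) :: r => if c = d then (c, n + m) :: r else (c, n) :: (d, m) :: r

-- proof helper: head-recursive run-length encoding
def pvRlh : List Char → List (Char × Nat)
  | [] => []
  | c :: cs => pvAbsorb c 1 (pvRlh cs)

-- proof helper: A's loop as a head recursion over adjacent pairs
def pvPairs : List Char → Bool × Option String
  | [] => (false, none)
  | [_] => (false, none)
  | a :: b :: rest =>
    if ¬ pvVoyelle a && a = b then (true, some (String.ofList [a])) else pvPairs (b :: rest)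

lemma pvALoop_eq_pairs (cs : List Char) (i : Nat) :
    pvALoop cs i = pvPairs (cs.drop i) := by
  unfold pvALoop
  split
  · next h =>
    have h1 : i < cs.length := by omega
    have h2 : i + 1 < cs.length := by omega
    have e1 : cs.drop i = cs[i] :: cs.drop (i+1) := List.drop_eq_getElem_cons h1
    have e2 : cs.drop (i+1) = cs[i+1] :: cs.drop (i+2) := List.drop_eq_getElem_cons h2
    rw [e1, e2, pvPairs]
    have ih := pvALoop_eq_pairs cs (i+1)
    rw [e2] at ih
    rw [ih]
    rfl
  · next h =>
    cases hd : cs.drop i with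
    | nil => rfl
    | cons x t =>
      have : t = [] := by
        have hl : (cs.drop i).length ≤ 1 := by simp; omega
        rw [hd] at hl; simp at hl; simp [hl]
      rw [this]; rfl
termination_by cs.length - i

lemma pvFoldl_append (cs : List Char) (xs : List (Char × Nat)) (p : Char × Nat) :
    List.foldl pvAddCh (xs ++ [p]) cs = xs ++ List.foldl pvAddCh [p] cs := by
  induction cs generalizing xs p with
  | nil => simp
  | cons c cs ih =>
    obtain ⟨pc, pn⟩ := p
    simp only [List.foldl_cons]
    have hstep : pvAddCh (xs ++ [(pc, pn)]) c =
        if pc = c then xs ++ [(pc, pn + 1)] else (xs ++ [(pc, pn)]) ++ [(c, 1)] := by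
      simp [pvAddCh]
    have hstep1 : pvAddCh [(pc, pn)] c =
        if pc = c then [(pc, pn + 1)] else [(pc, pn), (c, 1)] := by
      simp [pvAddCh]
    by_cases hpc : pc = c
    · rw [hstep, hstep1, if_pos hpc, if_pos hpc, ih]
    · rw [hstep, hstep1, if_neg hpc, if_neg hpc]
      rw [ih (xs ++ [(pc, pn)]) (c, 1)]
      have : ([(pc, pn), (c, 1)] : List (Char × Nat)) = [(pc, pn)] ++ [(c, 1)] := rfl
      rw [this, ih [(pc, pn)] (c, 1)]
      simp

lemma pvFoldl_single (cs : List Char) (c : Char) (n : Nat) :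
    List.foldl pvAddCh [(c, n)] cs = pvAbsorb c n (pvRlh cs) := by
  induction cs generalizing c n with
  | nil => simp [pvRlh, pvAbsorb]
  | cons d cs ih =>
    simp only [List.foldl_cons]
    have hstep : pvAddCh [(c, n)] d =
        if c = d then [(c, n + 1)] else [(c, n), (d, 1)] := by
      simp [pvAddCh]
    by_cases hcd : c = d
    · rw [hstep, if_pos hcd, ih]
      subst hcd
      cases h : pvRlh cs with
      | nil => simp [pvRlh, pvAbsorb, h]
      | cons p r =>
        obtain ⟨e, m⟩ := p
        by_cases hce : c = e
        · subst hce; simp [pvRlh, pvAbsorb, h]; omega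
        · simp [pvRlh, pvAbsorb, h, hce]
    · rw [hstep, if_neg hcd]
      have : ([(c, n), (d, 1)] : List (Char × Nat)) = [(c, n)] ++ [(d, 1)] := rfl
      rw [this, pvFoldl_append, ih]
      cases h : pvRlh cs with
      | nil => simp [pvRlh, pvAbsorb, h, hcd]
      | cons p r =>
        obtain ⟨e, m⟩ := p
        by_cases hde : d = e
        · subst hde; simp [pvRlh, pvAbsorb, h, hcd]
        · simp [pvRlh, pvAbsorb, h, hcd, hde]

lemma pvFoldl_eq_rlh (cs : List Char) :
    List.foldl pvAddCh [] cs = pvRlh cs := by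
  cases cs with
  | nil => rfl
  | cons c cs =>
    have : pvAddCh [] c = [(c, 1)] := by simp [pvAddCh]
    simp only [List.foldl_cons, this, pvFoldl_single, pvRlh]

-- the head of pvRlh (b :: rest) carries character b and a count >= 1
lemma pvRlh_cons (b : Char) (rest : List Char) :
    ∃ k r, pvRlh (b :: rest) = (b, k) :: r ∧ 1 ≤ k := by
  cases h : pvRlh rest with
  | nil => exact ⟨1, [], by simp [pvRlh, pvAbsorb, h], le_refl 1⟩
  | cons p r =>
    obtain ⟨e, m⟩ := p
    by_cases hbe : b = e
    · subst hbe; exact ⟨1 + m, r, by simp [pvRlh, pvAbsorb, h], by omega⟩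
    · exact ⟨1, (e, m) :: r, by simp [pvRlh, pvAbsorb, h, hbe], le_refl 1⟩

lemma pvPairs_eq_scan (cs : List Char) :
    pvPairs cs = pvScanRuns (pvRlh cs) := by
  induction cs with
  | nil => rfl
  | cons a l ih =>
    cases l with
    | nil => simp [pvPairs, pvRlh, pvAbsorb, pvScanRuns]
    | cons b rest =>
      obtain ⟨k, r, hr, hk⟩ := pvRlh_cons b rest
      rw [pvPairs]
      by_cases hab : a = b
      · subst hab
        have habs : pvRlh (a :: a :: rest) = (a, 1 + k) :: r := by
          conv_lhs => rw [pvRlh]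
          rw [hr]
          simp [pvAbsorb]
        rw [habs]
        by_cases hv : pvVoyelle a = true
        · -- vowel: both sides skip the fused run / the pair
          rw [if_neg (by simp [hv])]
          rw [pvScanRuns, if_neg (by simp [hv])]
          rw [ih, hr, pvScanRuns, if_neg (by simp [hv])]
        · -- doubled consonant: both return (true, a)
          rw [if_pos (by simp [hv])]
          rw [pvScanRuns, if_pos ⟨by omega, by simpa using hv⟩]
      · -- a ≠ b: the new run (a, 1) is too short; both recurse on b :: rest
        have habs : pvRlh (a :: b :: rest) = (a, 1) :: pvRlh (b :: rest) := by
          conv_lhs => rw [pvRlh]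
          rw [hr]
          simp [pvAbsorb, hab]
        rw [if_neg (by intro hc; simp [hab] at hc)]
        rw [habs, pvScanRuns, if_neg (by simp), ih]

-- ===== VERDICT (by name: the statement is the Claim_ definition above) =====
theorem double_consonne_spec : Claim_equal_double_consonne := by
  intro mot _
  unfold Spec_double_consonne double_consonne double_consonne_alt
  rw [pvFoldl_eq_rlh, ← pvPairs_eq_scan, pvALoop_eq_pairs]
  rfl
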